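-- pv_equiv track=rewrite | github.com/microsoft/PowerToys | PythonEnv/2.7/Lib/site-packages/setuptools/_backport/hashlib/_sha.py | _bytelist2longBigEndian
-- ===== SOURCE A (Python) =====
-- def _bytelist2longBigEndian(list):
--     "Transform a list of characters into a list of longs."
--
--     imax = len(list) // 4
--     hl = [0] * imax
--
--     j = 0
--     i = 0
--     while i < imax:
--         b0 = ord(list[j]) << 24
--         b1 = ord(list[j+1]) << 16
--         b2 = ord(list[j+2]) << 8
--         b3 = ord(list[j+3])
--         hl[i] = b0 | b1 | b2 | b3
--         i = i+1
--         j = j+4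
--
--     return hl
-- ===== SOURCE B (Python) =====
-- import struct
--
-- def _bytelist2longBigEndian(list):
--     "Transform a list of characters into a list of longs."
--     imax = len(list) // 4
--     s = ''.join(list[:imax * 4])
--     return [*struct.unpack('>%dL' % imax, s.encode('latin-1'))]
-- ===== Notes on version B (the rewrite author's own statement) =====
-- stated objective: idiomatic
-- what changed: Replaces the manual index-juggling shift/OR while-loop with a single big-endian struct.unpack over the joined (truncated) byte string.
import Mathlib
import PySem

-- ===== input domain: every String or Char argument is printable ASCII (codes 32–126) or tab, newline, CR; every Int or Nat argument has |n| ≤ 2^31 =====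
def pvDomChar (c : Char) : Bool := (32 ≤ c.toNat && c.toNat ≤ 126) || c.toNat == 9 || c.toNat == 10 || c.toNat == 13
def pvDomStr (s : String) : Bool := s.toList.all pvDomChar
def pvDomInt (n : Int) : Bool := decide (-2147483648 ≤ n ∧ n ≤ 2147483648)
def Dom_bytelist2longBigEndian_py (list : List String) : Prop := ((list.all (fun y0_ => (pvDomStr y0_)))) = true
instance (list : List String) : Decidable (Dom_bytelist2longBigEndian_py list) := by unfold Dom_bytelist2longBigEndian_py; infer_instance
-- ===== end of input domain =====

-- B replaces A's manual index-juggling shift/OR while-loop with one struct.unpack('>%dL') call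
-- over the joined truncated byte string (objective: idiomatic; same O(n) cost).

-- ===== PORT A =====
-- ord(s) on a length-1 string; Pre_ guarantees length 1, so headD never takes its default
def pvOrd (s : String) : Int := ((s.toList.headD ' ').toNat : Int)

-- the while loop; hl is mutated in place via List.set, exactly as Python assigns hl[i]
def pvLoopA (list : List String) (imax : Nat) (i j : Nat) (hl : List Int) : List Int :=
  if i < imax then
    let b0 : Int := (pvOrd (list.getD j "")) <<< (24 : Nat)
    let b1 : Int := (pvOrd (list.getD (j+1) "")) <<< (16 : Nat)
    let b2 : Int := (pvOrd (list.getD (j+2) "")) <<< (8 : Nat)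
    let b3 : Int := pvOrd (list.getD (j+3) "")
    pvLoopA list imax (i+1) (j+4) (hl.set i (PySem.Int.bor (PySem.Int.bor (PySem.Int.bor b0 b1) b2) b3))
  else hl
termination_by imax - i

def bytelist2longBigEndian_py (list : List String) : List Int :=
  let imax := list.length / 4
  pvLoopA list imax 0 0 (List.replicate imax (0 : Int))

-- ===== PORT B =====
-- struct.unpack('>%dL', s): consume the byte string four bytes at a time, big-endian
def pvUnpackBE : List Char → List Int
  | a :: b :: c :: d :: rest =>
      PySem.Int.bor (PySem.Int.bor (PySem.Int.bor ((a.toNat : Int) <<< (24 : Nat)) ((b.toNat : Int) <<< (16 : Nat)))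
        ((c.toNat : Int) <<< (8 : Nat))) (d.toNat : Int) :: pvUnpackBE rest
  | _ => []

def bytelist2longBigEndian_py_alt (list : List String) : List Int :=
  let imax := list.length / 4
  let s := (list.take (imax * 4)).flatMap String.toList   -- ''.join(list[:imax*4])
  pvUnpackBE s

-- ===== PRECONDITION & SPEC =====
-- Pre_ excludes exactly the inputs on which A raises: ord() raises TypeError unless every
-- element it consumes (the first 4*(len//4) elements) is a single character.
def Pre_bytelist2longBigEndian_py (list : List String) : Prop :=
  ∀ s ∈ list.take (4 * (list.length / 4)), s.toList.length = 1
instance (list : List String) : Decidable (Pre_bytelist2longBigEndian_py list) := by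
  unfold Pre_bytelist2longBigEndian_py; infer_instance
def pvWitness_bytelist2longBigEndian_py : List String := ["a", "b", "c", "d", "xy"]

def Spec_bytelist2longBigEndian_py (list : List String) (out : List Int) : Prop := out = bytelist2longBigEndian_py_alt list
instance (list : List String) (out : List Int) : Decidable (Spec_bytelist2longBigEndian_py list out) := by unfold Spec_bytelist2longBigEndian_py; infer_instance

-- ===== CLAIM (what is proved, stated in full; the proofs are below) =====
def Claim_equal_bytelist2longBigEndian_py : Prop := ∀ (list : List String), Dom_bytelist2longBigEndian_py list → Pre_bytelist2longBigEndian_py list → Spec_bytelist2longBigEndian_py list (bytelist2longBigEndian_py list)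

-- ===== LEMMAS AND PROOFS =====

-- the value A stores at slot k (where j = 4*k)
def pvVal (list : List String) (k : Nat) : Int :=
  PySem.Int.bor (PySem.Int.bor (PySem.Int.bor ((pvOrd (list.getD (4*k) "")) <<< (24 : Nat))
    ((pvOrd (list.getD (4*k+1) "")) <<< (16 : Nat))) ((pvOrd (list.getD (4*k+2) "")) <<< (8 : Nat)))
    (pvOrd (list.getD (4*k+3) ""))

theorem pvLoopA_spec (list : List String) (imax : Nat) :
    ∀ (m i : Nat) (hl : List Int), hl.length = imax → i + m = imax →
      pvLoopA list imax i (4*i) hl =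
        hl.take i ++ (List.range m).map (fun k => pvVal list (i+k)) := by
  intro m
  induction m with
  | zero =>
      intro i hl hlen him
      rw [pvLoopA, if_neg (by omega), List.take_of_length_le (by omega)]
      simp
  | succ m ih =>
      intro i hl hlen him
      rw [pvLoopA, if_pos (by omega : i < imax)]
      show pvLoopA list imax (i+1) (4*i+4) (hl.set i (pvVal list i)) = _
      rw [(by ring : 4*i + 4 = 4*(i+1)), ih (i+1) _ (by simpa using hlen) (by omega)]
      have hset : ∀ v : Int, (hl.set i v).take (i+1) = hl.take i ++ [v] := by
        intro v
        rw [List.take_add_one, List.take_set_of_le (le_refl i)]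
        have : (hl.set i v)[i]? = some v := by
          rw [List.getElem?_set_self', List.getElem?_eq_getElem (by omega)]
          rfl
        simp [this]
      rw [hset, List.range_succ_eq_map, List.map_cons, List.map_map, List.append_assoc,
          List.singleton_append]
      have hfun : ((fun k => pvVal list (i+k)) ∘ Nat.succ) = (fun k => pvVal list (i+1+k)) := by
        funext k
        show pvVal list (i + Nat.succ k) = pvVal list (i+1+k)
        rw [(by omega : i + Nat.succ k = i+1+k)]
      rw [hfun]
      simp

theorem pvUnpackBE_spec :
    ∀ (n : Nat) (cs : List Char), cs.length = 4*n →
      pvUnpackBE cs = (List.range n).map (fun k =>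
        PySem.Int.bor (PySem.Int.bor (PySem.Int.bor (((cs.getD (4*k) ' ').toNat : Int) <<< (24 : Nat))
          (((cs.getD (4*k+1) ' ').toNat : Int) <<< (16 : Nat))) (((cs.getD (4*k+2) ' ').toNat : Int) <<< (8 : Nat)))
          ((cs.getD (4*k+3) ' ').toNat : Int)) := by
  intro n
  induction n with
  | zero =>
      intro cs h
      simp only [Nat.mul_zero, List.length_eq_zero_iff] at h
      simp [h, pvUnpackBE]
  | succ n ih =>
      intro cs h
      match cs with
      | [] => simp at h
      | [a] => exfalso; simp at h; try omega
      | [a, b] => exfalso; simp at h; try omega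
      | [a, b, c] => exfalso; simp at h; try omega
      | a :: b :: c :: d :: rest =>
        have hr : rest.length = 4*n := by simp at h; omega
        rw [pvUnpackBE, ih rest hr, List.range_succ_eq_map, List.map_cons, List.map_map]
        refine congr_arg₂ List.cons ?_ ?_
        · norm_num [List.getD]
        · refine congrFun (congrArg List.map ?_) _
          funext k
          have e1 : 4*(k+1) = (((4*k)+1)+1)+1+1 := by ring
          simp [Function.comp, Nat.succ_eq_add_one, e1, List.getD]

theorem flatMap_of_len1 :
    ∀ (t : List String), (∀ s ∈ t, s.toList.length = 1) →
      t.flatMap String.toList = t.map (fun s => s.toList.headD ' ') := by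
  intro t
  induction t with
  | nil => intro _; rfl
  | cons s t ih =>
      intro h
      have hs := h s (List.mem_cons_self ..)
      have hrest := ih (fun x hx => h x (List.mem_cons_of_mem _ hx))
      match hsl : s.toList with
      | [c] => simp [List.flatMap_cons, hsl, hrest]
      | [] => rw [hsl] at hs; simp at hs
      | c :: c' :: cs => rw [hsl] at hs; simp at hs

-- ===== VERDICT (by name: the statement is the Claim_ definition above) =====
theorem bytelist2longBigEndian_py_spec : Claim_equal_bytelist2longBigEndian_py := by
  intro list _dom pre
  unfold Spec_bytelist2longBigEndian_py bytelist2longBigEndian_py bytelist2longBigEndian_py_alt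
  simp only []
  set imax := list.length / 4 with himax
  have hle : 4 * imax ≤ list.length := by omega
  -- A side
  have hA : pvLoopA list imax 0 0 (List.replicate imax (0 : Int)) =
      (List.range imax).map (fun k => pvVal list k) := by
    have := pvLoopA_spec list imax imax 0 (List.replicate imax (0 : Int))
      (by simp) (by omega)
    simpa using this
  -- B side
  set t := list.take (imax * 4) with ht
  have htlen : t.length = 4 * imax := by
    rw [ht, List.length_take]; omega
  have hpre' : ∀ s ∈ t, s.toList.length = 1 := by
    intro s hs; exact pre s (by rw [ht] at hs; rwa [Nat.mul_comm imax 4] at hs)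
  have hB : pvUnpackBE (t.flatMap String.toList) =
      (List.range imax).map (fun k =>
        PySem.Int.bor (PySem.Int.bor (PySem.Int.bor ((((t.map (fun s => s.toList.headD ' ')).getD (4*k) ' ').toNat : Int) <<< (24 : Nat))
          ((((t.map (fun s => s.toList.headD ' ')).getD (4*k+1) ' ').toNat : Int) <<< (16 : Nat)))
          ((((t.map (fun s => s.toList.headD ' ')).getD (4*k+2) ' ').toNat : Int) <<< (8 : Nat)))
          (((t.map (fun s => s.toList.headD ' ')).getD (4*k+3) ' ').toNat : Int)) := by
    rw [flatMap_of_len1 t hpre']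
    exact pvUnpackBE_spec imax _ (by simp [htlen])
  rw [hA, hB]
  apply List.map_congr_left
  intro k hk
  have hk' : k < imax := List.mem_range.mp hk
  have hidx : ∀ r : Nat, r ≤ 3 →
      ((t.map (fun s => s.toList.headD ' ')).getD (4*k+r) ' ').toNat = (pvOrd (list.getD (4*k+r) "")).toNat := by
    intro r hr
    have h1 : 4*k+r < (t.map (fun s => s.toList.headD ' ')).length := by
      simp [htlen]; omega
    have h2 : 4*k+r < t.length := by omega
    have h3 : 4*k+r < list.length := by omega
    rw [List.getD_eq_getElem _ _ h1, List.getElem_map]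
    rw [pvOrd, List.getD_eq_getElem _ _ h3]
    have : t[4*k+r]'h2 = list[4*k+r]'h3 := List.getElem_take
    rw [this]
    simp
  have hv : ∀ r : Nat, r ≤ 3 →
      (((t.map (fun s => s.toList.headD ' ')).getD (4*k+r) ' ').toNat : Int) = pvOrd (list.getD (4*k+r) "") := by
    intro r hr
    rw [hidx r hr, pvOrd]
    simp
  have hv0 := hv 0 (by omega)
  simp only [Nat.add_zero] at hv0
  rw [pvVal, hv0, hv 1 (by omega), hv 2 (by omega), hv 3 (by omega)]
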